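-- pv_equiv track=rewrite | github.com/maj34/algorithm-practice | 251016/개발팀의 능력/the-capabilities-of-the-development-team.py | min_capability_difference
-- ===== SOURCE A (Python) =====
-- import itertools
--
-- def min_capability_difference(devs):
--     min_diff = float('inf')
--     found = False
--
--     # 첫 번째 팀(2명)을 고르는 조합
--     for team1 in itertools.combinations(range(5), 2):
--         remaining1 = [i for i in range(5) if i not in team1]
--         # 두 번째 팀(2명)을 고르는 조합
--         for team2 in itertools.combinations(remaining1, 2):
--             remaining2 = [i for i in remaining1 if i not in team2]
--             team3 = remaining2  # 마지막 한 명
--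
--             # 팀 능력치 합 계산
--             t1_sum = sum(devs[i] for i in team1)
--             t2_sum = sum(devs[i] for i in team2)
--             t3_sum = sum(devs[i] for i in team3)
--
--             # 모두 달라야 함
--             if len({t1_sum, t2_sum, t3_sum}) == 3:
--                 diff = max(t1_sum, t2_sum, t3_sum) - min(t1_sum, t2_sum, t3_sum)
--                 min_diff = min(min_diff, diff)
--                 found = True
--
--     return min_diff if found else -1
-- ===== SOURCE B (Python) =====
-- def min_capability_difference(devs):
--     # Backtracking: assign each developer in turn to one of three teams with
--     # remaining capacities (2, 2, 1), accumulating the team sums along the way.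
--     def go(idxs, c1, c2, c3, s1, s2, s3, best):
--         if not idxs:
--             if s1 != s2 and s1 != s3 and s2 != s3:
--                 d = max(s1, s2, s3) - min(s1, s2, s3)
--                 if best is None or d < best:
--                     return d
--             return best
--         v = devs[idxs[0]]
--         rest = idxs[1:]
--         if c1:
--             best = go(rest, c1 - 1, c2, c3, s1 + v, s2, s3, best)
--         if c2:
--             best = go(rest, c1, c2 - 1, c3, s1, s2 + v, s3, best)
--         if c3:
--             best = go(rest, c1, c2, c3 - 1, s1, s2, s3 + v, best)
--         return best
--     best = go(list(range(5)), 2, 2, 1, 0, 0, 0, None)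
--     return -1 if best is None else best
-- ===== Notes on version B (the rewrite author's own statement) =====
-- stated objective: alternative
-- what changed: B replaces A's nested itertools.combinations enumeration of team pairs with a recursive backtracking search that assigns each developer in turn to one of three capacity-limited teams (caps 2,2,1), accumulating the team sums and threading the running minimum through the recursion.
import Mathlib
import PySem

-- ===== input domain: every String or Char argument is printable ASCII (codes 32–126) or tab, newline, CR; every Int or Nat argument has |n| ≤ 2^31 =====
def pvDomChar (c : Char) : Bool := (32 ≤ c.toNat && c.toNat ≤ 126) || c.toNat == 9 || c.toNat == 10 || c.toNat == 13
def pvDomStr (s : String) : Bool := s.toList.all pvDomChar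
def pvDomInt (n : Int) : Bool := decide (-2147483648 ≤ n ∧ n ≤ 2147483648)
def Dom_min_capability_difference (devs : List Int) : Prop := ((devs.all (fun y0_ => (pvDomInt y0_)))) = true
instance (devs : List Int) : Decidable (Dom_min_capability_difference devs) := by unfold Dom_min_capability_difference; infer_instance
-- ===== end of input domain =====

-- B replaces A's nested pair-combination enumeration by a recursive backtracking
-- search assigning each developer to a capacity-limited team (objective: alternative).

-- ===== PORT A =====
-- itertools.combinations(l, 2), in itertools order
def pyCombos2 (l : List Int) : List (Int × Int) :=
  match l with
  | [] => []
  | x :: xs => xs.map (fun y => (x, y)) ++ pyCombos2 xs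

-- devs[i]; on Pre_ (length ≥ 5) every index used is in range, so the default 0 is never used
def dg (devs : List Int) (i : Int) : Int := (PySem.List.pyGet? devs i).getD 0

-- Python's state is (min_diff, found) with min_diff starting at float('inf');
-- the port carries min_diff as an Option Int (none = inf) next to the literal found flag.
def min_capability_difference (devs : List Int) : Int :=
  let r5 : List Int := PySem.List.pyRange 0 5 1
  let st :=
    (pyCombos2 r5).foldl
      (fun st team1 =>
        let remaining1 := r5.filter (fun i => !(i == team1.1 || i == team1.2))
        (pyCombos2 remaining1).foldl
          (fun st team2 =>
            let remaining2 := remaining1.filter (fun i => !(i == team2.1 || i == team2.2))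
            let t1s := [team1.1, team1.2].foldl (fun s i => s + dg devs i) 0
            let t2s := [team2.1, team2.2].foldl (fun s i => s + dg devs i) 0
            let t3s := remaining2.foldl (fun s i => s + dg devs i) 0
            if (PySem.Set.ofList [t1s, t2s, t3s]).length == 3 then
              (some (match st.1 with
                     | none => max t1s (max t2s t3s) - min t1s (min t2s t3s)
                     | some m => min m (max t1s (max t2s t3s) - min t1s (min t2s t3s))), true)
            else st)
          st)
      ((none : Option Int), false)
  if st.2 then st.1.getD (-1) else -1

-- ===== PORT B =====
-- B's recursive helper go(idxs, c1, c2, c3, s1, s2, s3, best): structural recursion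
-- on the remaining index list, exactly as Source B recurses on idxs[1:].
def goB (devs : List Int) : List Int → Nat → Nat → Nat → Int → Int → Int →
    Option Int → Option Int
  | [], _, _, _, s1, s2, s3, best =>
      if s1 != s2 && s1 != s3 && s2 != s3 then
        let d := max s1 (max s2 s3) - min s1 (min s2 s3)
        match best with
        | none => some d
        | some m => if d < m then some d else some m
      else best
  | i :: rest, c1, c2, c3, s1, s2, s3, best =>
      let v := dg devs i
      let b1 := if 0 < c1 then goB devs rest (c1 - 1) c2 c3 (s1 + v) s2 s3 best else best
      let b2 := if 0 < c2 then goB devs rest c1 (c2 - 1) c3 s1 (s2 + v) s3 b1 else b1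
      if 0 < c3 then goB devs rest c1 c2 (c3 - 1) s1 s2 (s3 + v) b2 else b2

def min_capability_difference_alt (devs : List Int) : Int :=
  match goB devs (PySem.List.pyRange 0 5 1) 2 2 1 0 0 0 none with
  | none => -1
  | some m => m

-- ===== PRECONDITION & SPEC =====
-- Pre_ excludes lists of fewer than five developers, on which Python A raises IndexError.
def Pre_min_capability_difference (devs : List Int) : Prop := 5 ≤ devs.length
instance (devs : List Int) : Decidable (Pre_min_capability_difference devs) := by
  unfold Pre_min_capability_difference; infer_instance

def pvWitness_min_capability_difference : List Int := [1, 2, 3, 4, 5]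

def Spec_min_capability_difference (devs : List Int) (out : Int) : Prop := out = min_capability_difference_alt devs
instance (devs : List Int) (out : Int) : Decidable (Spec_min_capability_difference devs out) := by unfold Spec_min_capability_difference; infer_instance

-- ===== CLAIM (what is proved, stated in full; the proofs are below) =====
def Claim_equal_min_capability_difference : Prop := ∀ (devs : List Int), Dom_min_capability_difference devs → Pre_min_capability_difference devs → Spec_min_capability_difference devs (min_capability_difference devs)

-- ===== LEMMAS AND PROOFS =====

-- candidate of one partition: some spread if the three team sums are pairwise distinct
def cnd (x y z : Int) : Option Int :=
  if x ≠ y ∧ x ≠ z ∧ y ≠ z then some (max x (max y z) - min x (min y z)) else none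

-- running minimum on Option Int (none = "no candidate yet")
def omin : Option Int → Option Int → Option Int
  | none, b => b
  | some a, none => some a
  | some a, some b => some (min a b)

def hF (devs : List Int) (t : Int × Int × Int × Int × Int) : Option Int :=
  cnd (dg devs t.1 + dg devs t.2.1) (dg devs t.2.2.1 + dg devs t.2.2.2.1) (dg devs t.2.2.2.2)

-- A's 30 iterations, as (team1, team2, singleton) index tuples in A's order
def IDXA : List (Int × Int × Int × Int × Int) :=
  [(0, 1, 2, 3, 4), (0, 1, 2, 4, 3), (0, 1, 3, 4, 2), (0, 2, 1, 3, 4), (0, 2, 1, 4, 3),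
   (0, 2, 3, 4, 1), (0, 3, 1, 2, 4), (0, 3, 1, 4, 2), (0, 3, 2, 4, 1), (0, 4, 1, 2, 3),
   (0, 4, 1, 3, 2), (0, 4, 2, 3, 1), (1, 2, 0, 3, 4), (1, 2, 0, 4, 3), (1, 2, 3, 4, 0),
   (1, 3, 0, 2, 4), (1, 3, 0, 4, 2), (1, 3, 2, 4, 0), (1, 4, 0, 2, 3), (1, 4, 0, 3, 2),
   (1, 4, 2, 3, 0), (2, 3, 0, 1, 4), (2, 3, 0, 4, 1), (2, 3, 1, 4, 0), (2, 4, 0, 1, 3),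
   (2, 4, 0, 3, 1), (2, 4, 1, 3, 0), (3, 4, 0, 1, 2), (3, 4, 0, 2, 1), (3, 4, 1, 2, 0)]

-- B's 30 leaves, as (team1, team2, singleton) index tuples in DFS order
def IDXB : List (Int × Int × Int × Int × Int) :=
  [(0, 1, 2, 3, 4), (0, 1, 2, 4, 3), (0, 1, 3, 4, 2), (0, 2, 1, 3, 4), (0, 2, 1, 4, 3),
   (0, 3, 1, 2, 4), (0, 4, 1, 2, 3), (0, 3, 1, 4, 2), (0, 4, 1, 3, 2), (0, 2, 3, 4, 1),
   (0, 3, 2, 4, 1), (0, 4, 2, 3, 1), (1, 2, 0, 3, 4), (1, 2, 0, 4, 3), (1, 3, 0, 2, 4),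
   (1, 4, 0, 2, 3), (1, 3, 0, 4, 2), (1, 4, 0, 3, 2), (2, 3, 0, 1, 4), (2, 4, 0, 1, 3),
   (3, 4, 0, 1, 2), (2, 3, 0, 4, 1), (2, 4, 0, 3, 1), (3, 4, 0, 2, 1), (1, 2, 3, 4, 0),
   (1, 3, 2, 4, 0), (1, 4, 2, 3, 0), (2, 3, 1, 4, 0), (2, 4, 1, 3, 0), (3, 4, 1, 2, 0)]

theorem omin_rcomm (s a b : Option Int) : omin (omin s a) b = omin (omin s b) a := by
  cases s <;> cases a <;> cases b <;> simp [omin] <;> omega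

theorem foldl_omin_perm {l1 l2 : List (Option Int)} (h : l1.Perm l2) (s : Option Int) :
    l1.foldl omin s = l2.foldl omin s := by
  induction h generalizing s with
  | nil => rfl
  | cons x _ ih => simp only [List.foldl]; exact ih _
  | swap x y l => simp only [List.foldl, omin_rcomm]
  | trans _ _ ih1 ih2 => rw [ih1, ih2]

-- length of set({a,b,c}) == 3  ↔  the three values are pairwise distinct
theorem setlen3 (x y z : Int) :
    ((PySem.Set.ofList [x, y, z]).length == 3) = decide (x ≠ y ∧ x ≠ z ∧ y ≠ z) := by
  by_cases hxy : x = y <;> by_cases hxz : x = z <;> by_cases hyz : y = z <;>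
    simp [PySem.Set.ofList, PySem.Set.add, hxy, hxz, hyz, eq_comm]

-- A's loop body, per candidate, is an omin update of the first component
theorem stepA_pair (st : Option Int × Bool) (x y z : Int) :
    (if (PySem.Set.ofList [x, y, z]).length == 3 then
       (some (match st.1 with
              | none => max x (max y z) - min x (min y z)
              | some m => min m (max x (max y z) - min x (min y z))), true)
     else st)
    = (omin st.1 (cnd x y z), if x ≠ y ∧ x ≠ z ∧ y ≠ z then true else st.2) := by
  rw [setlen3]
  simp only [decide_eq_true_eq]
  by_cases h : x ≠ y ∧ x ≠ z ∧ y ≠ z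
  · rcases st with ⟨s, b⟩; cases s <;> simp [cnd, omin, h]
  · rcases st with ⟨s, b⟩; cases s <;> simp [cnd, omin, h]

-- B's leaf, given pairwise comparisons, is the same omin update
theorem leafB (best : Option Int) (s1 s2 s3 : Int) :
    (if s1 != s2 && s1 != s3 && s2 != s3 then
       let d := max s1 (max s2 s3) - min s1 (min s2 s3)
       match best with
       | none => some d
       | some m => if d < m then some d else some m
     else best) = omin best (cnd s1 s2 s3) := by
  have hc : (s1 != s2 && s1 != s3 && s2 != s3) = true ↔ (s1 ≠ s2 ∧ s1 ≠ s3 ∧ s2 ≠ s3) := by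
    simp [and_assoc]
  simp only [hc]
  unfold cnd
  by_cases H : s1 ≠ s2 ∧ s1 ≠ s3 ∧ s2 ≠ s3
  · rw [if_pos H, if_pos H]
    cases best with
    | none => rfl
    | some m =>
      simp only [omin]
      split <;> simp only [Option.some.injEq] <;> omega
  · rw [if_neg H, if_neg H]
    cases best <;> rfl

theorem foldl_inv {α σ : Type} (P : σ → Prop) (f : σ → α → σ) (h : ∀ s t, P s → P (f s t)) :
    ∀ (l : List α) (s : σ), P s → P (l.foldl f s) := by
  intro l
  induction l with
  | nil => intro s hs; exact hs
  | cons x xs ih => intro s hs; exact ih _ (h s x hs)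

-- the fold inside port A, verbatim
def AFold (devs : List Int) : Option Int × Bool :=
  (pyCombos2 (PySem.List.pyRange 0 5 1)).foldl
    (fun st team1 =>
      let remaining1 := (PySem.List.pyRange 0 5 1).filter (fun i => !(i == team1.1 || i == team1.2))
      (pyCombos2 remaining1).foldl
        (fun st team2 =>
          let remaining2 := remaining1.filter (fun i => !(i == team2.1 || i == team2.2))
          let t1s := [team1.1, team1.2].foldl (fun s i => s + dg devs i) 0
          let t2s := [team2.1, team2.2].foldl (fun s i => s + dg devs i) 0
          let t3s := remaining2.foldl (fun s i => s + dg devs i) 0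
          if (PySem.Set.ofList [t1s, t2s, t3s]).length == 3 then
            (some (match st.1 with
                   | none => max t1s (max t2s t3s) - min t1s (min t2s t3s)
                   | some m => min m (max t1s (max t2s t3s) - min t1s (min t2s t3s))), true)
          else st)
        st)
    ((none : Option Int), false)

theorem A_port_eq (devs : List Int) :
    min_capability_difference devs = if (AFold devs).2 then (AFold devs).1.getD (-1) else -1 := rfl

theorem AFold_snd (devs : List Int) : (AFold devs).2 = (AFold devs).1.isSome := by
  unfold AFold
  apply foldl_inv (P := fun st : Option Int × Bool => st.2 = st.1.isSome)
  · intro s t hs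
    apply foldl_inv (P := fun st : Option Int × Bool => st.2 = st.1.isSome)
    · intro s' t' hs'
      dsimp only
      split
      · rfl
      · exact hs'
    · exact hs
  · rfl

theorem r5_eq : PySem.List.pyRange 0 5 1 = [0, 1, 2, 3, 4] := by decide

theorem AFold_fst (devs : List Int) :
    (AFold devs).1 = (IDXA.map (hF devs)).foldl omin none := by
  unfold AFold
  rw [r5_eq]
  simp only [stepA_pair]
  simp [pyCombos2, IDXA, hF, omin]

theorem A_eq (devs : List Int) :
    min_capability_difference devs = ((IDXA.map (hF devs)).foldl omin none).getD (-1) := by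
  rw [A_port_eq, AFold_snd, AFold_fst]
  cases (IDXA.map (hF devs)).foldl omin none <;> rfl

def leavesB (devs : List Int) : List Int → Nat → Nat → Nat → Int → Int → Int → List (Option Int)
  | [], _, _, _, s1, s2, s3 => [cnd s1 s2 s3]
  | i :: rest, c1, c2, c3, s1, s2, s3 =>
      let v := dg devs i
      (if 0 < c1 then leavesB devs rest (c1 - 1) c2 c3 (s1 + v) s2 s3 else []) ++
      (if 0 < c2 then leavesB devs rest c1 (c2 - 1) c3 s1 (s2 + v) s3 else []) ++
      (if 0 < c3 then leavesB devs rest c1 c2 (c3 - 1) s1 s2 (s3 + v) else [])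

theorem goB_leaves (devs : List Int) (idxs : List Int) :
    ∀ (c1 c2 c3 : Nat) (s1 s2 s3 : Int) (best : Option Int),
      goB devs idxs c1 c2 c3 s1 s2 s3 best
        = (leavesB devs idxs c1 c2 c3 s1 s2 s3).foldl omin best := by
  induction idxs with
  | nil =>
    intro c1 c2 c3 s1 s2 s3 best
    simp only [goB, leavesB, List.foldl]
    exact leafB best s1 s2 s3
  | cons i rest ih =>
    intro c1 c2 c3 s1 s2 s3 best
    simp only [goB, leavesB, List.foldl_append]
    split_ifs <;> simp [ih]

set_option maxRecDepth 4000 in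
theorem leavesB_eq (devs : List Int) :
    leavesB devs [0, 1, 2, 3, 4] 2 2 1 0 0 0 = IDXB.map (hF devs) := by
  simp [leavesB, IDXB, hF]

theorem B_eq (devs : List Int) :
    min_capability_difference_alt devs = ((IDXB.map (hF devs)).foldl omin none).getD (-1) := by
  unfold min_capability_difference_alt
  rw [r5_eq, goB_leaves, leavesB_eq]
  cases (IDXB.map (hF devs)).foldl omin none <;> rfl

theorem idx_perm : IDXA.Perm IDXB := by decide

theorem fold_eq (devs : List Int) :
    (IDXA.map (hF devs)).foldl omin none = (IDXB.map (hF devs)).foldl omin none :=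
  foldl_omin_perm (List.Perm.map (hF devs) idx_perm) none

-- ===== VERDICT (by name: the statement is the Claim_ definition above) =====
theorem min_capability_difference_spec : Claim_equal_min_capability_difference := by
  intro devs _ _
  unfold Spec_min_capability_difference
  rw [A_eq, B_eq, fold_eq]
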